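-- pv_equiv track=rewrite | github.com/AlephAlpha/Nekomata | analyze.py | ngram_freq
-- ===== SOURCE A (Python) =====
-- def ngram_freq(corpus: list[str], n: int) -> dict[str, int]:
--     freq = {}
--     for line in corpus:
--         for i in range(len(line) - n + 1):
--             ngram = line[i:i+n]
--             if ngram not in freq:
--                 freq[ngram] = 0
--             freq[ngram] += 1
--     freq = dict(sorted(freq.items(), key=lambda item: item[1], reverse=True))
--     return freq
-- ===== SOURCE B (Python) =====
-- def ngram_freq(corpus: list[str], n: int) -> dict[str, int]:
--     # flat list of every n-gram, then ordered dedup + count scans, then stable sort by count desc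
--     grams = [line[i:i+n] for line in corpus for i in range(len(line) - n + 1)]
--     seen = []
--     for g in grams:
--         if g not in seen:
--             seen.append(g)
--     pairs = [(g, grams.count(g)) for g in seen]
--     pairs.sort(key=lambda p: p[1], reverse=True)
--     return dict(pairs)
-- ===== Notes on version B (the rewrite author's own statement) =====
-- stated objective: alternative
-- what changed: Replaces A's incremental hash-into-dict counting with a flat list of all n-grams, an ordered dedup list, and a count scan per distinct n-gram, sorting the resulting pairs once by count descending.
import Mathlib
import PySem

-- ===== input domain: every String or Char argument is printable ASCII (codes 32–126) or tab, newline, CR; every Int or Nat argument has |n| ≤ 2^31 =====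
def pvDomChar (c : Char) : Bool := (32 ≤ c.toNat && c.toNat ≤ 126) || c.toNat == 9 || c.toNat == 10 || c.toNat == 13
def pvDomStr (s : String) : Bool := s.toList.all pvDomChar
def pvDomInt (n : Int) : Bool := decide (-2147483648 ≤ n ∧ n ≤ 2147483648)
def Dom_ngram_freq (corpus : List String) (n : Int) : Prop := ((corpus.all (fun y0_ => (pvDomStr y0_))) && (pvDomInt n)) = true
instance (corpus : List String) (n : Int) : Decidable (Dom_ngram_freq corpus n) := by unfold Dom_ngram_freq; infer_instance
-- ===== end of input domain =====

-- B replaces A's incremental dict counting by a flat n-gram list with ordered dedup,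
-- per-distinct-n-gram count scans and one final sort by count descending (alternative decomposition, not faster).


-- ===== PORT A =====
def ngram_freq (corpus : List String) (n : Int) : List (String × Int) :=
  let freq : PySem.Dict String Int :=
    corpus.foldl (fun freq line =>
      (PySem.List.pyRange 0 (PySem.Str.len line - n + 1) 1).foldl (fun freq i =>
        let ngram := PySem.Str.slice line (some i) (some (i + n))
        let freq := if freq.contains ngram then freq else freq.insert ngram 0
        freq.modify ngram 0 (· + 1)) freq) PySem.Dict.empty
  PySem.List.sorted freq.items (fun item => item.2) true

-- ===== PORT B =====
def ngram_freq_alt (corpus : List String) (n : Int) : List (String × Int) :=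
  let grams := corpus.flatMap (fun line =>
    (PySem.List.pyRange 0 (PySem.Str.len line - n + 1) 1).map (fun i =>
      PySem.Str.slice line (some i) (some (i + n))))
  let seen := grams.foldl (fun seen g => if g ∈ seen then seen else seen ++ [g]) ([] : List String)
  let pairs := seen.map (fun g => (g, (grams.count g : Int)))
  PySem.List.sorted pairs (fun p => p.2) true

-- ===== PRECONDITION & SPEC =====
def Spec_ngram_freq (corpus : List String) (n : Int) (out : List (String × Int)) : Prop := out = ngram_freq_alt corpus n
instance (corpus : List String) (n : Int) (out : List (String × Int)) : Decidable (Spec_ngram_freq corpus n out) := by unfold Spec_ngram_freq; infer_instance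

-- ===== CLAIM (what is proved, stated in full; the proofs are below) =====
def Claim_equal_ngram_freq : Prop := ∀ (corpus : List String) (n : Int), Dom_ngram_freq corpus n → Spec_ngram_freq corpus n (ngram_freq corpus n)

-- ===== LEMMAS AND PROOFS =====

-- A's loop body (insert 0 if missing, then += 1) is Counter's single modify step.
theorem aStep_point (d : PySem.Dict String Int) (g : String) :
    (if d.contains g then d else d.insert g 0).modify g 0 (fun x => x + 1)
      = d.modify g 0 (fun x => x + 1) := by
  by_cases h : d.contains g
  · simp [h]
  · simp only [h, if_false, Bool.false_eq_true]
    show (d.insert g 0).insert g ((d.insert g 0).getD g 0 + 1)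
        = d.insert g (d.getD g 0 + 1)
    rw [PySem.Dict.getD_insert_self, PySem.Dict.insert_insert_self,
        PySem.Dict.getD_of_not_contains d 0 (by simpa using h)]

-- B's ordered-dedup loop body is PySem.Set.add.
theorem seenStep_point (s : List String) (g : String) :
    (if g ∈ s then s else s ++ [g]) = PySem.Set.add s g := by
  simp [PySem.Set.add]

-- ===== VERDICT (by name: the statement is the Claim_ definition above) =====
theorem ngram_freq_spec : Claim_equal_ngram_freq := by
  intro corpus n _
  show ngram_freq corpus n = ngram_freq_alt corpus n
  unfold ngram_freq ngram_freq_alt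
  simp only [aStep_point, seenStep_point]
  rw [show (List.foldl PySem.Set.add ([] : List String)
        (corpus.flatMap (fun line =>
          (PySem.List.pyRange 0 (PySem.Str.len line - n + 1) 1).map (fun i =>
            PySem.Str.slice line (some i) (some (i + n))))) : List String)
      = PySem.Set.ofList (corpus.flatMap (fun line =>
          (PySem.List.pyRange 0 (PySem.Str.len line - n + 1) 1).map (fun i =>
            PySem.Str.slice line (some i) (some (i + n))))) from rfl]
  rw [show (List.foldl
        (fun freq line =>
          (PySem.List.pyRange 0 (PySem.Str.len line - n + 1) 1).foldl (fun freq i =>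
            (freq.modify (PySem.Str.slice line (some i) (some (i + n))) 0 (fun x => x + 1)))
            freq)
        PySem.Dict.empty corpus : PySem.Dict String Int)
      = PySem.Dict.counter (corpus.flatMap (fun line =>
          (PySem.List.pyRange 0 (PySem.Str.len line - n + 1) 1).map (fun i =>
            PySem.Str.slice line (some i) (some (i + n))))) from by
        rw [PySem.Dict.counter_eq_foldl]
        simp only [List.foldl_flatMap, List.foldl_map]]
  rw [PySem.Dict.items_counter]
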